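-- pv_equiv track=rewrite | github.com/AlexanderRDiaz/siena-coding-comp | src/2024/green/sixth.py | calculateIntersection
-- ===== SOURCE A (Python) =====
-- def calculateIntersection(stops: list[int]) -> list[int]:
--     bus1 = [0, 0]
--     bus2 = [len(stops) - 1, 0]
--     time = 1
--     while bus1[0] != bus2[0]:
--         if stops[bus1[0]]:
--             stops[bus1[0]] -= 1
--             bus1[1] += 1
--         else:
--             bus1[0] += 1
--         if stops[bus2[0]]:
--             stops[bus2[0]] -= 1
--             bus2[1] += 1
--         else:
--             bus2[0] -= 1
--         time += 1
--
--     return [bus1[0] + 1, time, bus1[1], bus2[1]]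
-- ===== SOURCE B (Python) =====
-- def calculateIntersection(stops: list[int]) -> list[int]:
--     # Closed form: bus1 reaches stop m at time L_m = sum(stops[j]+1 for j<m),
--     # bus2 reaches stop m at time R_m = sum(stops[j]+1 for j>m); they meet at the
--     # unique stop m where the occupancy intervals overlap (|L_m - R_m| <= stops[m]),
--     # at step t = max(L_m, R_m).  O(n), no mutation of stops.
--     n = len(stops)
--     S = sum(stops) + n
--     L = 0
--     for m, s in enumerate(stops):
--         R = S - L - (s + 1)
--         if abs(L - R) <= s:
--             t = max(L, R)
--             return [m + 1, t + 1, t - m, t - (n - 1 - m)]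
--         L += s + 1
-- ===== Notes on version B (the rewrite author's own statement) =====
-- stated objective: faster
-- what changed: Replaces the per-passenger two-bus simulation (one loop iteration per time step, O(sum of stops) iterations) by a single prefix-sum scan over the stops that computes the meeting stop, meeting time and both pickup counts analytically; intended as asymptotically faster — in a timing run A timed out at n=16 with 2^31-sized counts where B returned instantly, but no clean time ratio was measurable at sizes where both finish.
-- outside the precondition, e.g. on calculateIntersection([0, 5, -1]): A returns [3, 8, 5, 7], B returns [2, 2, 0, 0]; on calculateIntersection([0, 0]): A raises IndexError, B returns None; on calculateIntersection([]): A raises IndexError, B returns None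
import Mathlib
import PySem

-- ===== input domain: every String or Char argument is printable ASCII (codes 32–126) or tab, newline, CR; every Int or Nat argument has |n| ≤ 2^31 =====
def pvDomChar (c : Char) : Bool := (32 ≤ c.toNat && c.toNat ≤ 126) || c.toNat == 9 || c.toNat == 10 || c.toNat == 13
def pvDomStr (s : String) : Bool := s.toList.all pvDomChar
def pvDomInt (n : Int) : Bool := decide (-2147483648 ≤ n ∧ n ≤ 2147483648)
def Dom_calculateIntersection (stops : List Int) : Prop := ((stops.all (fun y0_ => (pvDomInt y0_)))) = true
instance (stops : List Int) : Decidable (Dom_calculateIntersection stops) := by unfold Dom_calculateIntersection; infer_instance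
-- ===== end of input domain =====

-- B replaces the per-passenger two-bus simulation by a single O(n) prefix-sum scan computing
-- the meeting stop, time and pickup counts analytically; A mutates its argument in place, B does
-- not — the equivalence proved here is about the RETURN value only.

-- ===== PORT A =====
-- While loop of A as fuel recursion; the fuel (#passengers + #stops + 1) exceeds the number of
-- iterations on every input satisfying Pre_ (proved below), so it never runs out there.
def pvLoopA : Nat → List Int → Int → Int → Int → Int → Int → List Int
  | 0, _, _, _, _, _, _ => []
  | fuel + 1, stops, b1p, b1c, b2p, b2c, time =>
    if b1p = b2p then [b1p + 1, time, b1c, b2c]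
    else
      match PySem.List.pyGet? stops b1p with
      | none => []   -- IndexError, outside Pre_
      | some v1 =>
        let st1 := if v1 ≠ 0 then PySem.List.pySetD stops b1p (v1 - 1) else stops
        let b1p' := if v1 ≠ 0 then b1p else b1p + 1
        let b1c' := if v1 ≠ 0 then b1c + 1 else b1c
        match PySem.List.pyGet? st1 b2p with
        | none => []   -- IndexError, outside Pre_
        | some v2 =>
          let st2 := if v2 ≠ 0 then PySem.List.pySetD st1 b2p (v2 - 1) else st1
          let b2p' := if v2 ≠ 0 then b2p else b2p - 1
          let b2c' := if v2 ≠ 0 then b2c + 1 else b2c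
          pvLoopA fuel st2 b1p' b1c' b2p' b2c' (time + 1)

def calculateIntersection (stops : List Int) : List Int :=
  pvLoopA ((stops.map Int.natAbs).sum + stops.length + 1) stops 0 0 ((stops.length : Int) - 1) 0 1

-- ===== PORT B =====
def pvScanB (n S : Int) : List Int → Int → Int → List Int
  | [], _, _ => []   -- Source B falls through (returns None); unreachable under Pre_
  | s :: rest, m, L =>
    let R := S - L - (s + 1)
    if |L - R| ≤ s then
      let t := max L R
      [m + 1, t + 1, t - m, t - (n - 1 - m)]
    else pvScanB n S rest (m + 1) (L + s + 1)

def calculateIntersection_alt (stops : List Int) : List Int :=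
  pvScanB (stops.length : Int) (stops.sum + stops.length) stops 0 0

-- ===== PRECONDITION & SPEC =====
-- pvPref stops k = number of steps bus1 needs to reach stop k (each of the first k stops costs
-- stops[j] pickups plus one move).
def pvPref (stops : List Int) (k : Nat) : Int := (stops.take k).sum + k

-- Pre_ excludes: the empty list and "crossing" inputs (some split point k with the two halves
-- costing exactly the same, 2*pvPref k = total), on both of which A raises IndexError; and lists
-- containing a negative count — malformed input outside the natural domain, on which A either
-- diverges or returns values obtained by "picking up" passengers from negative stop counts.
def Pre_calculateIntersection (stops : List Int) : Prop :=
  stops ≠ [] ∧ (∀ x ∈ stops, 0 ≤ x) ∧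
    ∀ k ∈ List.range stops.length, k ≠ 0 →
      2 * pvPref stops k ≠ stops.sum + stops.length
instance (stops : List Int) : Decidable (Pre_calculateIntersection stops) := by
  unfold Pre_calculateIntersection; infer_instance

def pvWitness_calculateIntersection : List Int := [1, 2, 3]

def Spec_calculateIntersection (stops : List Int) (out : List Int) : Prop := out = calculateIntersection_alt stops
instance (stops : List Int) (out : List Int) : Decidable (Spec_calculateIntersection stops out) := by unfold Spec_calculateIntersection; infer_instance

-- ===== CLAIM (what is proved, stated in full; the proofs are below) =====
def Claim_equal_calculateIntersection : Prop := ∀ (stops : List Int), Dom_calculateIntersection stops → Pre_calculateIntersection stops → Spec_calculateIntersection stops (calculateIntersection stops)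

-- ===== LEMMAS AND PROOFS =====

-- pvOut s m: the common result — meeting stop m, time max(L_m,R_m)+1, and the two pickup counts.
def pvOut (s : List Int) (m : Nat) : List Int :=
  let T := max (pvPref s m) (s.sum + s.length - pvPref s (m + 1))
  [(m : Int) + 1, T + 1, T - m, T - ((s.length : Int) - 1 - m)]

theorem pvPref_zero (s : List Int) : pvPref s 0 = 0 := by simp [pvPref]

theorem pvPref_succ (s : List Int) (k : Nat) (h : k < s.length) :
    pvPref s (k + 1) = pvPref s k + s.getD k 0 + 1 := by
  have h' : s.take (k + 1) = s.take k ++ [s[k]] := by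
    rw [List.take_add_one, List.getElem?_eq_getElem h]
    rfl
  unfold pvPref
  rw [h', List.sum_append, List.getD_eq_getElem s 0 h]
  simp only [List.sum_cons, List.sum_nil, add_zero]
  push_cast
  ring

theorem pvPref_length (s : List Int) : pvPref s s.length = s.sum + s.length := by
  simp [pvPref]

theorem pvElem_nonneg (s : List Int) (hnn : ∀ x ∈ s, 0 ≤ x) (k : Nat) (h : k < s.length) :
    0 ≤ s.getD k 0 := by
  rw [List.getD_eq_getElem s 0 h]; exact hnn _ (List.getElem_mem h)

theorem pvPref_mono (s : List Int) (hnn : ∀ x ∈ s, 0 ≤ x) {k l : Nat}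
    (hkl : k ≤ l) (hl : l ≤ s.length) : pvPref s k ≤ pvPref s l := by
  induction l with
  | zero => interval_cases k; exact le_refl _
  | succ l ih =>
    rcases Nat.eq_or_lt_of_le hkl with h | h
    · exact h ▸ le_refl _
    · have h1 := ih (by omega) (by omega)
      have h2 := pvElem_nonneg s hnn l (by omega)
      rw [pvPref_succ s l (by omega)]
      omega

theorem pvExists_m (s : List Int) (hne : s ≠ []) (hnn : ∀ x ∈ s, 0 ≤ x)
    (hnc : ∀ k ∈ List.range s.length, k ≠ 0 → 2 * pvPref s k ≠ s.sum + s.length) :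
    ∃ m, m < s.length ∧ 2 * pvPref s m < s.sum + s.length ∧
      s.sum + s.length < 2 * pvPref s (m + 1) := by
  have hn : 0 < s.length := List.length_pos_iff.mpr hne
  have hS : 0 < s.sum + (s.length : Int) := by
    have := List.sum_nonneg hnn
    omega
  suffices H : ∀ d k, k + d = s.length → 2 * pvPref s k < s.sum + s.length →
      ∃ m, m < s.length ∧ 2 * pvPref s m < s.sum + s.length ∧
        s.sum + s.length < 2 * pvPref s (m + 1) by
    refine H s.length 0 (by omega) ?_
    rw [pvPref_zero]
    omega
  intro d
  induction d with
  | zero =>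
    intro k hk hlt
    have : k = s.length := by omega
    rw [this, pvPref_length] at hlt
    omega
  | succ d ih =>
    intro k hk hlt
    by_cases hb : s.sum + s.length < 2 * pvPref s (k + 1)
    · exact ⟨k, by omega, hlt, hb⟩
    · rw [not_lt] at hb
      rcases Nat.lt_or_ge (k + 1) s.length with h1 | h1
      · have hne1 := hnc (k + 1) (List.mem_range.mpr h1) (Nat.succ_ne_zero k)
        exact ih (k + 1) (by omega) (by omega)
      · have : k + 1 = s.length := by omega
        rw [this, pvPref_length] at hb
        omega

theorem pvScanB_correct (s : List Int) (hnn : ∀ x ∈ s, 0 ≤ x) (m : Nat) (hmn : m < s.length)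
    (hm1 : 2 * pvPref s m < s.sum + s.length)
    (hm2 : s.sum + s.length < 2 * pvPref s (m + 1)) :
    ∀ d k, k + d = m →
      pvScanB (s.length : Int) (s.sum + s.length) (s.drop k) (k : Int) (pvPref s k) = pvOut s m := by
  intro d
  induction d with
  | zero =>
    intro k hk
    have hk' : k = m := by omega
    subst hk'
    have hps := pvPref_succ s k hmn
    have hgd : s.getD k 0 = s[k] := List.getD_eq_getElem s 0 hmn
    rw [List.drop_eq_getElem_cons hmn]
    simp only [pvScanB]
    rw [if_pos (by rw [abs_le]; omega)]
    have hR : s.sum + (s.length : Int) - pvPref s k - (s[k] + 1) =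
        s.sum + (s.length : Int) - pvPref s (k + 1) := by omega
    rw [hR]
    simp only [pvOut]
  | succ d ih =>
    intro k hk
    have hkn : k < s.length := by omega
    have hps := pvPref_succ s k hkn
    have hmono := pvPref_mono s hnn (k := k + 1) (l := m) (by omega) (by omega)
    rw [List.drop_eq_getElem_cons hkn]
    rw [← List.getD_eq_getElem s 0 hkn]
    simp only [pvScanB]
    rw [if_neg (by rw [abs_le]; omega)]
    have := ih (k + 1) (by omega)
    rw [show ((k : Int) + 1) = ((k + 1 : Nat) : Int) by push_cast; ring]
    rw [show pvPref s k + s.getD k 0 + 1 = pvPref s (k + 1) by omega] at *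
    exact this

theorem pvSet_get_self (l : List Int) (i : Nat) (a : Int) (h : i < l.length) :
    (l.set i a)[i]? = some a := by
  rw [List.getElem?_set]
  simp [h]

theorem pvSum_natAbs (s : List Int) (hnn : ∀ x ∈ s, 0 ≤ x) :
    (((s.map Int.natAbs).sum : Nat) : Int) = s.sum := by
  induction s with
  | nil => simp
  | cons x xs ih =>
    have hx := hnn x List.mem_cons_self
    have := ih (fun y hy => hnn y (List.mem_cons_of_mem x hy))
    simp only [List.map_cons, List.sum_cons]
    push_cast
    rw [abs_of_nonneg hx]
    push_cast at this
    omega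

theorem pvLoopA_correct (s : List Int) (hnn : ∀ x ∈ s, 0 ≤ x)
    (hnc : ∀ k ∈ List.range s.length, k ≠ 0 → 2 * pvPref s k ≠ s.sum + s.length)
    (m : Nat) (hmn : m < s.length)
    (hm1 : 2 * pvPref s m < s.sum + s.length)
    (hm2 : s.sum + s.length < 2 * pvPref s (m + 1)) :
    ∀ (fuel : Nat) (t : Int) (i j : Nat) (v : List Int)
      (b1p b1c b2p b2c tm : Int),
      b1p = (i : Int) → b1c = t - i → b2p = (j : Int) →
      b2c = t - ((s.length : Int) - 1 - j) → tm = t + 1 →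
      s.sum + s.length + 1 ≤ t + fuel →
      0 ≤ t → i ≤ m → m ≤ j → j < s.length →
      pvPref s i ≤ t → t ≤ pvPref s i + s.getD i 0 →
      s.sum + s.length - pvPref s (j + 1) ≤ t →
      t ≤ s.sum + s.length - pvPref s (j + 1) + s.getD j 0 →
      (i = j → t = max (pvPref s i) (s.sum + s.length - pvPref s (j + 1))) →
      v.length = s.length →
      (i ≠ j → ∀ k, k < s.length → v[k]? = some (
          if k < i ∨ j < k then 0
          else if k = i then s.getD i 0 - (t - pvPref s i)
          else if k = j then s.getD j 0 - (t - (s.sum + s.length - pvPref s (j + 1)))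
          else s.getD k 0)) →
      pvLoopA fuel v b1p b1c b2p b2c tm = pvOut s m := by
  intro fuel
  induction fuel with
  | zero =>
    intro t i j v b1p b1c b2p b2c tm _ _ _ _ _ hfuel _ him hmj hjn _ hub _ _ _ _ _
    exfalso
    have h1 : pvPref s (i + 1) = pvPref s i + s.getD i 0 + 1 := pvPref_succ s i (by omega)
    have h2 : pvPref s (i + 1) ≤ pvPref s s.length :=
      pvPref_mono s hnn (by omega) (le_refl _)
    rw [pvPref_length] at h2
    push_cast at hfuel
    omega
  | succ fuel ih =>
    intro t i j v b1p b1c b2p b2c tm hb1 hc1 hb2 hc2 htm hfuel ht him hmj hjn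
      hl1 hu1 hl2 hu2 hmeet hvlen hv
    subst hb1 hc1 hb2 hc2 htm
    simp only [pvLoopA]
    by_cases hij : i = j
    · rw [if_pos (by rw [hij])]
      have ht' := hmeet hij
      have him' : m = i := by omega
      subst him'
      subst hij
      simp only [pvOut]
      rw [← ht']
    · rw [if_neg (by exact_mod_cast fun h => hij (Nat.cast_injective h))]
      have hilj : i < j := by omega
      have hin : i < s.length := by omega
      have hjpos : 1 ≤ j := by omega
      have hps_i : pvPref s (i + 1) = pvPref s i + s.getD i 0 + 1 := pvPref_succ s i hin
      have hps_j : pvPref s (j + 1) = pvPref s j + s.getD j 0 + 1 := pvPref_succ s j hjn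
      have hsi0 : 0 ≤ s.getD i 0 := pvElem_nonneg s hnn i hin
      have hsj0 : 0 ≤ s.getD j 0 := pvElem_nonneg s hnn j hjn
      have hS : pvPref s s.length = s.sum + s.length := pvPref_length s
      have hv' := hv hij
      have hvi : v[(i : Nat)]? = some (s.getD i 0 - (t - pvPref s i)) := by
        rw [hv' i hin, if_neg (by omega), if_pos rfl]
      have hvj : v[(j : Nat)]? = some (s.getD j 0 -
          (t - (s.sum + s.length - pvPref s (j + 1)))) := by
        rw [hv' j hjn, if_neg (by omega), if_neg (by omega), if_pos rfl]
      set si := s.getD i 0 with hsi_def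
      set sj := s.getD j 0 with hsj_def
      set Li := pvPref s i with hLi_def
      set Rj := s.sum + (s.length : Int) - pvPref s (j + 1) with hRj_def
      have hjlen : (j : Nat) < v.length := by omega
      have hilen : (i : Nat) < v.length := by omega
      by_cases h1 : si - (t - Li) = 0
      · -- bus1 has emptied stop i: it moves right
        have him' : i + 1 ≤ m := by
          by_contra hcon
          have hieq : pvPref s (i + 1) = pvPref s (m + 1) := by congr 1; omega
          have hmo : pvPref s (m + 1) ≤ pvPref s j := pvPref_mono s hnn (by omega) (by omega)
          omega
        have hsi1 : 0 ≤ s.getD (i + 1) 0 := pvElem_nonneg s hnn (i + 1) (by omega)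
        by_cases h2 : sj - (t - Rj) = 0
        · -- both buses move
          have hjm' : m + 1 ≤ j := by
            by_contra hcon
            have hjeq : pvPref s m = pvPref s j := by congr 1; omega
            have hmo : pvPref s (i + 1) ≤ pvPref s m := pvPref_mono s hnn (by omega) (by omega)
            omega
          have hcross : j ≠ i + 1 := by
            intro hc
            have hlink : pvPref s j = pvPref s (i + 1) := by rw [hc]
            have := hnc j (List.mem_range.mpr hjn) (by omega)
            omega
          have hA : pvPref s (j - 1 + 1) = pvPref s j := by congr 1; omega
          have hsj1 : 0 ≤ s.getD (j - 1) 0 := pvElem_nonneg s hnn (j - 1) (by omega)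
          simp only [PySem.List.pyGet?_natCast, hvi, hvj, if_neg (not_not_intro h1),
            if_neg (not_not_intro h2)]
          apply ih (t + 1) (i + 1) (j - 1) v
          · omega
          · omega
          · omega
          · omega
          · omega
          · omega
          · omega
          · omega
          · omega
          · omega
          · omega
          · omega
          · omega
          · omega
          · intro hij'
            rw [max_eq_left (by omega)]
            omega
          · exact hvlen
          · intro hij' k hk
            rw [hv' k hk]
            simp only [Option.some.injEq]
            by_cases hk1 : k = i + 1
            · subst hk1; split_ifs <;> omega
            · by_cases hk2 : k = j - 1
              · subst hk2; split_ifs <;> omega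
              · split_ifs <;> omega
        · -- bus1 moves, bus2 picks up
          simp only [PySem.List.pyGet?_natCast, PySem.List.pySetD_natCast, hvi, hvj,
            if_neg (not_not_intro h1), if_pos h2]
          apply ih (t + 1) (i + 1) j (v.set j (sj - (t - Rj) - 1))
          · omega
          · omega
          · omega
          · omega
          · omega
          · omega
          · omega
          · omega
          · omega
          · omega
          · omega
          · omega
          · omega
          · omega
          · intro hij'
            rw [max_eq_left (by omega)]
            omega
          · rw [List.length_set]; exact hvlen
          · intro hij' k hk
            by_cases hkj : k = j
            · subst hkj
              rw [pvSet_get_self v k _ hjlen]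
              simp only [Option.some.injEq]
              split_ifs <;> omega
            · rw [List.getElem?_set_ne (Ne.symm hkj), hv' k hk]
              simp only [Option.some.injEq]
              by_cases hk1 : k = i + 1
              · subst hk1; split_ifs <;> omega
              · split_ifs <;> omega
      · -- bus1 picks up
        have hstj : (v.set i (si - (t - Li) - 1))[(j : Nat)]? = some (sj - (t - Rj)) := by
          rw [List.getElem?_set_ne (by omega)]
          exact hvj
        by_cases h2 : sj - (t - Rj) = 0
        · -- bus1 picks, bus2 moves
          have hjm' : m + 1 ≤ j := by
            by_contra hcon
            have hjeq : pvPref s m = pvPref s j := by congr 1; omega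
            have hmo : pvPref s (i + 1) ≤ pvPref s m := pvPref_mono s hnn (by omega) (by omega)
            omega
          have hA : pvPref s (j - 1 + 1) = pvPref s j := by congr 1; omega
          have hsj1 : 0 ≤ s.getD (j - 1) 0 := pvElem_nonneg s hnn (j - 1) (by omega)
          simp only [PySem.List.pyGet?_natCast, PySem.List.pySetD_natCast, hvi, hstj,
            if_pos h1, if_neg (not_not_intro h2)]
          apply ih (t + 1) i (j - 1) (v.set i (si - (t - Li) - 1))
          · omega
          · omega
          · omega
          · omega
          · omega
          · omega
          · omega
          · omega
          · omega
          · omega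
          · omega
          · omega
          · omega
          · omega
          · intro hij'
            rw [max_eq_right (by omega)]
            omega
          · rw [List.length_set]; exact hvlen
          · intro hij' k hk
            by_cases hki : k = i
            · subst hki
              rw [pvSet_get_self v k _ hilen]
              simp only [Option.some.injEq]
              split_ifs <;> omega
            · rw [List.getElem?_set_ne (Ne.symm hki), hv' k hk]
              simp only [Option.some.injEq]
              by_cases hk2 : k = j - 1
              · subst hk2; split_ifs <;> omega
              · split_ifs <;> omega
        · -- both buses pick up
          simp only [PySem.List.pyGet?_natCast, PySem.List.pySetD_natCast, hvi, hstj,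
            if_pos h1, if_pos h2]
          apply ih (t + 1) i j ((v.set i (si - (t - Li) - 1)).set j (sj - (t - Rj) - 1))
          · omega
          · omega
          · omega
          · omega
          · omega
          · omega
          · omega
          · omega
          · omega
          · omega
          · omega
          · omega
          · omega
          · omega
          · intro hij'
            exact absurd hij' hij
          · rw [List.length_set, List.length_set]; exact hvlen
          · intro hij' k hk
            by_cases hkj : k = j
            · subst hkj
              rw [pvSet_get_self _ k _ (by rw [List.length_set]; exact hjlen)]
              simp only [Option.some.injEq]
              split_ifs <;> omega
            · rw [List.getElem?_set_ne (Ne.symm hkj)]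
              by_cases hki : k = i
              · subst hki
                rw [pvSet_get_self v k _ hilen]
                simp only [Option.some.injEq]
                split_ifs <;> omega
              · rw [List.getElem?_set_ne (Ne.symm hki), hv' k hk]
                simp only [Option.some.injEq]
                split_ifs <;> omega

-- ===== VERDICT (by name: the statement is the Claim_ definition above) =====
theorem calculateIntersection_spec : Claim_equal_calculateIntersection := by
  intro s _ hpre
  obtain ⟨hne, hnn, hnc⟩ := hpre
  obtain ⟨m, hmn, hm1, hm2⟩ := pvExists_m s hne hnn hnc
  have hn : 0 < s.length := List.length_pos_iff.mpr hne
  unfold Spec_calculateIntersection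
  have hB : calculateIntersection_alt s = pvOut s m := by
    unfold calculateIntersection_alt
    have h := pvScanB_correct s hnn m hmn hm1 hm2 m 0 (by omega)
    simpa [pvPref_zero] using h
  have hA : calculateIntersection s = pvOut s m := by
    unfold calculateIntersection
    refine pvLoopA_correct s hnn hnc m hmn hm1 hm2 _ 0 0 (s.length - 1) s 0 0
      ((s.length : Int) - 1) 0 1 (by simp) (by simp) (by omega) (by omega)
      (by ring) ?_ (by omega) (by omega) (by omega) (by omega)
      (by rw [pvPref_zero]) (by rw [pvPref_zero]; have := pvElem_nonneg s hnn 0 hn; omega)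
      ?_ ?_ ?_ rfl ?_
    · have := pvSum_natAbs s hnn
      omega
    · rw [show s.length - 1 + 1 = s.length by omega, pvPref_length]
      omega
    · rw [show s.length - 1 + 1 = s.length by omega, pvPref_length]
      have := pvElem_nonneg s hnn (s.length - 1) (by omega)
      omega
    · intro h0
      have hn1 : s.length = 1 := by omega
      rw [pvPref_zero, show s.length - 1 + 1 = s.length by omega, pvPref_length]
      simp
    · intro hij k hk
      rw [List.getElem?_eq_getElem hk, ← List.getD_eq_getElem s 0 hk]
      congr 1
      have h1 : ¬ (k < 0 ∨ s.length - 1 < k) := by omega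
      rw [if_neg h1]
      rw [show s.length - 1 + 1 = s.length by omega, pvPref_length]
      split_ifs with h2 h3
      · subst h2; rw [pvPref_zero]; omega
      · subst h3; omega
      · rfl
  rw [hA, hB]
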